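-- pv_equiv track=rewrite | github.com/keg-tucn/AMR | pre_post_processing/stanford_train_preprocessing_util.py | construct_alignment_mapping
-- ===== SOURCE A (Python) =====
-- def construct_alignment_mapping(sen_len: int, no_tokens_removed: int, removal_indexes):
--     alignment_mapping = {}
--     for i in range(0, sen_len):
--         alignment_mapping[i] = i
--     for removal_index in removal_indexes:
--         for i in range(0, sen_len):
--             if i > removal_index:
--                 old_mapping = alignment_mapping[i]
--                 alignment_mapping[i] = old_mapping - no_tokens_removed + 1
--     return alignment_mapping
-- ===== SOURCE B (Python) =====
-- def construct_alignment_mapping(sen_len: int, no_tokens_removed: int, removal_indexes):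
--     shift = no_tokens_removed - 1
--     remaining = sorted(removal_indexes, reverse=True)  # consume from the end in ascending order
--     passed = 0
--     out = {}
--     for i in range(sen_len):
--         while remaining and remaining[-1] < i:
--             remaining.pop()
--             passed += 1
--         out[i] = i - passed * shift
--     return out
-- ===== Notes on version B (the rewrite author's own statement) =====
-- stated objective: faster
-- what changed: Instead of re-scanning all sen_len positions once per removal index, B sorts the removal indexes once and does a single sweep over positions with a moving pointer, so each mapping is i - passed*(no_tokens_removed-1) computed directly.
import Mathlib
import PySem

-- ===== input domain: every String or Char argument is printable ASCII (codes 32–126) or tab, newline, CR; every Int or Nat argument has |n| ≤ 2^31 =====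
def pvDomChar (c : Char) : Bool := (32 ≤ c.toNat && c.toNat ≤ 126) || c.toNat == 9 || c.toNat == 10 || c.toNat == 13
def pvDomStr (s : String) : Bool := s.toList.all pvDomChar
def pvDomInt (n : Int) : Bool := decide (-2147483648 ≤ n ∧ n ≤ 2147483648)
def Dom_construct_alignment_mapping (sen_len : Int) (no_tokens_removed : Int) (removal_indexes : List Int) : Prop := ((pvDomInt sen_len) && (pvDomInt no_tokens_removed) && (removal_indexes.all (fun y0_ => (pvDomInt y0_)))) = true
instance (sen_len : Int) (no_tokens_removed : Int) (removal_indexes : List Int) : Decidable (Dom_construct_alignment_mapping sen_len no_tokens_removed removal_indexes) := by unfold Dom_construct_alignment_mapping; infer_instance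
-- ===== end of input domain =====

-- One-line summary: B replaces A's per-removal full rescan of all positions (O(R*N))
-- with one sorted sweep and a moving pointer (O(N + R log R)); a timing run measured B faster.


-- ===== PORT A =====
-- Literal port of A: build {i: i} for i in range(sen_len), then for each removal index
-- subtract (no_tokens_removed - 1) from every mapping with i > removal_index.
-- 'alignment_mapping[i]' is read with getD 0: the key i is always present (it was inserted
-- by the first loop over the same range), so no KeyError is reachable and the default is never used.
def construct_alignment_mapping (sen_len : Int) (no_tokens_removed : Int) (removal_indexes : List Int) : List (Int × Int) :=
  let d0 : PySem.Dict Int Int :=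
    (PySem.List.pyRange 0 sen_len 1).foldl (fun d i => d.insert i i) PySem.Dict.empty
  let d : PySem.Dict Int Int :=
    removal_indexes.foldl (fun d removal_index =>
      (PySem.List.pyRange 0 sen_len 1).foldl (fun d i =>
        if removal_index < i then
          let old_mapping := d.getD i 0
          d.insert i (old_mapping - no_tokens_removed + 1)
        else d) d) d0
  d.items

-- ===== PORT B =====
-- B-side helper: the 'while remaining and remaining[-1] < i: remaining.pop(); passed += 1' loop.
-- Python B keeps the sorted removals DESCENDING and pops from the end; the Lean port keeps them
-- ASCENDING and consumes from the head — the same elements in the same order.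
def pvAdvance (i : Int) : List Int → Int → (List Int × Int)
  | [], passed => ([], passed)
  | r :: tl, passed => if r < i then pvAdvance i tl (passed + 1) else (r :: tl, passed)

def construct_alignment_mapping_alt (sen_len : Int) (no_tokens_removed : Int) (removal_indexes : List Int) : List (Int × Int) :=
  let shift := no_tokens_removed - 1
  let rs := PySem.List.sorted removal_indexes (fun x => x) false
  let st :=
    (PySem.List.pyRange 0 sen_len 1).foldl
      (fun (st : List Int × Int × PySem.Dict Int Int) i =>
        let rem := st.1
        let passed := st.2.1
        let out := st.2.2
        let a := pvAdvance i rem passed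
        (a.1, a.2, out.insert i (i - a.2 * shift)))
      (rs, 0, PySem.Dict.empty)
  st.2.2.items

-- ===== PRECONDITION & SPEC =====
def Spec_construct_alignment_mapping (sen_len : Int) (no_tokens_removed : Int) (removal_indexes : List Int) (out : List (Int × Int)) : Prop := out = construct_alignment_mapping_alt sen_len no_tokens_removed removal_indexes
instance (sen_len : Int) (no_tokens_removed : Int) (removal_indexes : List Int) (out : List (Int × Int)) : Decidable (Spec_construct_alignment_mapping sen_len no_tokens_removed removal_indexes out) := by unfold Spec_construct_alignment_mapping; infer_instance

-- ===== CLAIM (what is proved, stated in full; the proofs are below) =====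
def Claim_equal_construct_alignment_mapping : Prop := ∀ (sen_len : Int) (no_tokens_removed : Int) (removal_indexes : List Int), Dom_construct_alignment_mapping sen_len no_tokens_removed removal_indexes → Spec_construct_alignment_mapping sen_len no_tokens_removed removal_indexes (construct_alignment_mapping sen_len no_tokens_removed removal_indexes)

-- ===== LEMMAS AND PROOFS =====

-- Both sides equal this canonical table: position i maps to i - (#removals < i) * (ntr - 1).
def pvModel (sen_len ntr : Int) (rs : List Int) : List (Int × Int) :=
  (PySem.List.pyRange 0 sen_len 1).map
    (fun i => (i, i - (rs.countP (fun r => decide (r < i)) : Int) * (ntr - 1)))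

-- inner pass, generalized
theorem pvA_inner (ntr r : Int) :
    ∀ (L : List Int) (keyL : List Int) (g : Int → Int) (d : PySem.Dict Int Int),
      L.Nodup → keyL.Nodup → (∀ x ∈ L, x ∈ keyL) →
      d.items = keyL.map (fun i => (i, g i)) →
      (L.foldl (fun d i => if r < i then d.insert i (d.getD i 0 - ntr + 1) else d) d).items
        = keyL.map (fun i => (i, if i ∈ L ∧ r < i then g i - ntr + 1 else g i)) := by
  intro L
  induction L with
  | nil => intro keyL g d _ _ _ hd; simpa using hd
  | cons x L ih =>
    intro keyL g d hnd hk hsub hd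
    have hxk : x ∈ keyL := hsub x (List.mem_cons_self)
    have hkeys : d.keys = keyL := by
      show d.items.map Prod.fst = keyL
      rw [hd, List.map_map]
      have : (Prod.fst ∘ fun i : Int => (i, g i)) = id := by funext i; rfl
      rw [this, List.map_id]
    have hknd : d.keys.Nodup := by rw [hkeys]; exact hk
    have hxL : x ∉ L := (List.nodup_cons.mp hnd).1
    have hndL : L.Nodup := (List.nodup_cons.mp hnd).2
    by_cases hrx : r < x
    · have hgx : d.getD x 0 = g x :=
        PySem.Dict.getD_of_mem_items d (by rw [hd]; exact List.mem_map_of_mem hxk) hknd 0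
      have hcont : d.contains x = true := by
        rw [PySem.Dict.contains_iff_mem_keys, hkeys]; exact hxk
      have hitems : (d.insert x (d.getD x 0 - ntr + 1)).items
          = keyL.map (fun i => (i, if i = x then g x - ntr + 1 else g i)) := by
        rw [PySem.Dict.items_insert_of_contains d _ hcont, hd, List.map_map]
        apply List.map_congr_left
        intro i _
        by_cases hix : i = x
        · subst hix; simp [hgx]
        · simp [hix]
      simp only [List.foldl_cons, if_pos hrx]
      rw [ih keyL _ _ hndL hk (fun y hy => hsub y (List.mem_cons_of_mem _ hy)) hitems]
      apply List.map_congr_left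
      intro i _
      by_cases hix : i = x
      · subst hix; simp [hxL, hrx]
      · by_cases hiL : i ∈ L <;> simp [hix, hiL]
    · simp only [List.foldl_cons, if_neg hrx]
      rw [ih keyL g d hndL hk (fun y hy => hsub y (List.mem_cons_of_mem _ hy)) hd]
      apply List.map_congr_left
      intro i _
      by_cases hix : i = x
      · subst hix; simp [hxL, hrx]
      · by_cases hiL : i ∈ L <;> simp [hix, hiL]

theorem pvA_pass (ntr r : Int) (keyL : List Int) (hk : keyL.Nodup) (g : Int → Int)
    (d : PySem.Dict Int Int) (hd : d.items = keyL.map (fun i => (i, g i))) :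
    (keyL.foldl (fun d i => if r < i then d.insert i (d.getD i 0 - ntr + 1) else d) d).items
      = keyL.map (fun i => (i, if r < i then g i - ntr + 1 else g i)) := by
  rw [pvA_inner ntr r keyL keyL g d hk hk (fun x h => h) hd]
  apply List.map_congr_left
  intro i hi
  simp [hi]

theorem pvA_outer (ntr : Int) (keyL : List Int) (hk : keyL.Nodup) :
    ∀ (rs : List Int) (g : Int → Int) (d : PySem.Dict Int Int),
      d.items = keyL.map (fun i => (i, g i)) →
      (rs.foldl (fun d r =>
          keyL.foldl (fun d i => if r < i then d.insert i (d.getD i 0 - ntr + 1) else d) d) d).items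
        = keyL.map (fun i => (i, g i - (rs.countP (fun x => decide (x < i)) : Int) * (ntr - 1))) := by
  intro rs
  induction rs with
  | nil =>
    intro g d hd
    simp only [List.foldl_nil, hd]
    apply List.map_congr_left
    intro i _
    simp
  | cons r rs ih =>
    intro g d hd
    simp only [List.foldl_cons]
    rw [ih _ _ (pvA_pass ntr r keyL hk g d hd)]
    apply List.map_congr_left
    intro i _
    by_cases hri : r < i
    · simp only [List.countP_cons, hri, decide_true, if_pos]
      push_cast
      ring_nf
    · simp only [List.countP_cons, hri, decide_false]
      simp

theorem pv_A_eq_model (sen_len ntr : Int) (rs : List Int) :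
    construct_alignment_mapping sen_len ntr rs = pvModel sen_len ntr rs := by
  unfold construct_alignment_mapping pvModel
  have hinit : (((PySem.List.pyRange 0 sen_len 1).foldl (fun d i => d.insert i i)
      (PySem.Dict.empty : PySem.Dict Int Int)).items)
      = (PySem.List.pyRange 0 sen_len 1).map (fun i => (i, (fun i : Int => i) i)) := by
    have h := PySem.Dict.items_foldl_insert_fresh (l := PySem.List.pyRange 0 sen_len 1)
        (k := fun i => i) (v := fun i => i) (d := (PySem.Dict.empty : PySem.Dict Int Int))
        (by intro a _; exact PySem.Dict.contains_empty a)
        (by simpa using PySem.List.nodup_pyRange_one (a := 0) (b := sen_len))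
    simpa using h
  have h := pvA_outer ntr (PySem.List.pyRange 0 sen_len 1)
      (PySem.List.nodup_pyRange_one (a := 0) (b := sen_len)) rs (fun i => i) _ hinit
  simpa using h

theorem pvAdvance_spec (i : Int) :
    ∀ (l : List Int) (p : Int), l.Pairwise (· ≤ ·) →
      pvAdvance i l p = (l.filter (fun x => !decide (x < i)), p + (l.countP (fun x => decide (x < i)) : Int)) := by
  intro l
  induction l with
  | nil => intro p _; simp [pvAdvance]
  | cons r tl ih =>
    intro p hp
    rw [List.pairwise_cons] at hp
    by_cases hri : r < i
    · rw [pvAdvance, if_pos hri, ih (p + 1) hp.2]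
      simp only [Prod.mk.injEq]
      constructor
      · simp [hri]
      · simp only [List.countP_cons, hri, decide_true]
        push_cast; ring
    · rw [pvAdvance, if_neg hri]
      have hall : ∀ x ∈ tl, ¬ x < i := fun x hx => by have := hp.1 x hx; omega
      simp only [Prod.mk.injEq]
      constructor
      · rw [List.filter_cons]
        simp only [hri, decide_false, Bool.not_false, if_pos]
        rw [List.filter_eq_self.mpr (by intro x hx; simpa using hall x hx)]
      · rw [List.countP_cons]
        simp only [hri, decide_false]
        rw [List.countP_eq_zero.mpr (by intro x hx; simpa using hall x hx)]
        simp

theorem pvFiltFilt (rs : List Int) (t i : Int) (h : t ≤ i) :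
    (rs.filter (fun x => !decide (x < t))).filter (fun x => !decide (x < i))
      = rs.filter (fun x => !decide (x < i)) := by
  induction rs with
  | nil => rfl
  | cons r rsi ih =>
    by_cases h1 : r < t
    · have h2 : r < i := by omega
      simp [h1, h2, ih]
    · simp only [List.filter_cons, h1, decide_false, Bool.not_false, if_pos]
      by_cases h2 : r < i <;> simp [h2, ih]

theorem pvFiltCnt (rs : List Int) (t i : Int) (h : t ≤ i) :
    (rs.countP (fun x => decide (x < t)) : Int)
      + ((rs.filter (fun x => !decide (x < t))).countP (fun x => decide (x < i)) : Int)
      = rs.countP (fun x => decide (x < i)) := by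
  induction rs with
  | nil => simp
  | cons r rsi ih =>
    by_cases h1 : r < t
    · have h2 : r < i := by omega
      simp only [List.countP_cons, List.filter_cons, h1, h2, decide_true]
      push_cast at ih ⊢
      simp
      omega
    · by_cases h2 : r < i <;>
        · simp only [List.countP_cons, List.filter_cons, h1, h2, decide_true, decide_false,
            Bool.not_false, if_pos]
          push_cast at ih ⊢
          simp
          omega

theorem pvB_fold (sh : Int) (rs : List Int) :
    ∀ (m : Nat) (a : Int) (rem : List Int) (p : Int) (d : PySem.Dict Int Int),
      rem.Pairwise (· ≤ ·) →
      (∀ i : Int, a ≤ i → rem.filter (fun x => !decide (x < i)) = rs.filter (fun x => !decide (x < i))) →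
      (∀ i : Int, a ≤ i → p + (rem.countP (fun x => decide (x < i)) : Int) = rs.countP (fun x => decide (x < i))) →
      (∀ j : Int, a ≤ j → d.contains j = false) →
      (((List.range m).map (fun k : Nat => a + (k : Int))).foldl
          (fun (st : List Int × Int × PySem.Dict Int Int) i =>
            ((pvAdvance i st.1 st.2.1).1, (pvAdvance i st.1 st.2.1).2,
              st.2.2.insert i (i - (pvAdvance i st.1 st.2.1).2 * sh))) (rem, p, d)).2.2.items
        = d.items ++ (List.range m).map
            (fun k : Nat => (a + (k : Int), a + (k : Int) - (rs.countP (fun x => decide (x < a + (k : Int))) : Int) * sh)) := by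
  intro m
  induction m with
  | zero => intro a rem p d _ _ _ _; simp
  | succ m ih =>
    intro a rem p d hpw hf hc hd
    rw [List.range_succ_eq_map, List.map_cons, List.foldl_cons]
    dsimp only
    simp only [Int.natCast_zero, add_zero]
    have hadv : pvAdvance a rem p
        = (rs.filter (fun x => !decide (x < a)), (rs.countP (fun x => decide (x < a)) : Int)) := by
      rw [pvAdvance_spec _ rem p hpw, hf a (le_refl a), hc a (le_refl a)]
    rw [hadv]
    dsimp only
    rw [List.map_map]
    have hmap1 : List.map ((fun k : Nat => a + (k : Int)) ∘ Nat.succ) (List.range m)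
        = List.map (fun k : Nat => (a + 1) + (k : Int)) (List.range m) := by
      apply List.map_congr_left
      intro k _
      simp only [Function.comp]
      push_cast
      ring
    rw [hmap1]
    have hstep := ih (a + 1) (rs.filter (fun x => !decide (x < a)))
        (rs.countP (fun x => decide (x < a)))
        (d.insert a (a - (rs.countP (fun x => decide (x < a)) : Int) * sh))
        (by rw [← hf a (le_refl a)]; exact hpw.filter _)
        (by intro i hi; exact pvFiltFilt rs a i (by omega))
        (by intro i hi; exact pvFiltCnt rs a i (by omega))
        (by
          intro j hj
          rw [PySem.Dict.contains_insert]
          have h1 : (j == a) = false := beq_false_of_ne (by omega)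
          rw [h1, hd j (by omega)]
          rfl)
    rw [hstep]
    rw [PySem.Dict.items_insert_of_not_contains d _ (hd a (le_refl a))]
    rw [List.append_assoc]
    congr 1
    rw [List.map_cons, List.map_map, List.singleton_append]
    simp only [Int.natCast_zero, add_zero]
    congr 1
    apply List.map_congr_left
    intro k _
    simp only [Function.comp]
    have h1 : a + ((Nat.succ k : Nat) : Int) = a + 1 + (k : Int) := by push_cast; ring
    rw [h1]

theorem pv_B_eq_model (sen_len ntr : Int) (rs : List Int) :
    construct_alignment_mapping_alt sen_len ntr rs = pvModel sen_len ntr rs := by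
  unfold construct_alignment_mapping_alt pvModel
  have hrange : PySem.List.pyRange 0 sen_len 1
      = (List.range (sen_len - 0).toNat).map (fun k : Nat => (0 : Int) + (k : Int)) :=
    PySem.List.pyRange_one 0 sen_len
  rw [hrange]
  have hsorted := PySem.List.sorted_pairwise rs (fun x : Int => x)
  have h := pvB_fold (ntr - 1) (PySem.List.sorted rs (fun x => x) false)
      (sen_len - 0).toNat 0 (PySem.List.sorted rs (fun x => x) false) 0 PySem.Dict.empty
      hsorted
      (fun i _ => rfl)
      (fun i _ => by simp)
      (fun j _ => PySem.Dict.contains_empty j)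
  dsimp only at h ⊢
  rw [h]
  have hemp : (PySem.Dict.empty : PySem.Dict Int Int).items = [] := rfl
  rw [hemp, List.nil_append, List.map_map]
  apply List.map_congr_left
  intro k _
  simp only [Function.comp, zero_add]
  congr 3
  exact_mod_cast ((PySem.List.sorted_perm rs (fun x => x) false).countP_eq _)

-- ===== VERDICT (by name: the statement is the Claim_ definition above) =====
theorem construct_alignment_mapping_spec : Claim_equal_construct_alignment_mapping := by
  intro sen_len ntr rs _
  unfold Spec_construct_alignment_mapping
  rw [pv_A_eq_model, pv_B_eq_model]
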